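-- pv_equiv track=rewrite | github.com/YoureJhin/Project2_Vladimirov_M-25-555 | src/simple_json_db/where.py | _replace_single_equals
-- ===== SOURCE A (Python) =====
-- def _replace_single_equals(text: str) -> str:
--     # Преобразование одиночного "=" в "==", игнорируя уже существующие "==", "!=", ">=", "<="
--     out = []
--     i = 0
--     while i < len(text):
--         ch = text[i]
--         if ch == "=":
--             prev = text[i - 1] if i > 0 else ""
--             nxt = text[i + 1] if i + 1 < len(text) else ""
--             if prev in {"!", ">", "<", "="} or nxt == "=":
--                 out.append("=")
--             else:
--                 out.append("==")
--             i += 1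
--             continue
--         out.append(ch)
--         i += 1
--     return "".join(out)
-- ===== SOURCE B (Python) =====
-- def _replace_single_equals(text: str) -> str:
--     # Stage 1: split the text on '=' -- each gap between adjacent parts is one '='.
--     # Stage 2: a gap's '=' is standalone iff it is not adjacent to another '='
--     # (neighbouring part empty, except at the string ends) and the character
--     # before it is not one of '!<>'; standalone gaps are emitted as '=='.
--     parts = text.split('=')
--     n = len(parts)
--     pieces = [parts[0]]
--     for k in range(1, n):
--         left, right = parts[k - 1], parts[k]
--         single = (left != '' or k == 1) and (right != '' or k == n - 1) \
--                  and (left == '' or left[-1] not in '!<>')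
--         pieces.append('==' if single else '=')
--         pieces.append(right)
--     return ''.join(pieces)
-- ===== Notes on version B (the rewrite author's own statement) =====
-- stated objective: faster
-- what changed: replaced the per-character index scan (which inspects prev/next characters around each equals sign) by a staged run-based algorithm: split the text once on the equals sign, classify each gap purely from the emptiness of the neighbouring split parts and the last character of the left part, then rejoin; the character-level work moves into C-level str.split/str.join instead of a per-character Python loop
import Mathlib
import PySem

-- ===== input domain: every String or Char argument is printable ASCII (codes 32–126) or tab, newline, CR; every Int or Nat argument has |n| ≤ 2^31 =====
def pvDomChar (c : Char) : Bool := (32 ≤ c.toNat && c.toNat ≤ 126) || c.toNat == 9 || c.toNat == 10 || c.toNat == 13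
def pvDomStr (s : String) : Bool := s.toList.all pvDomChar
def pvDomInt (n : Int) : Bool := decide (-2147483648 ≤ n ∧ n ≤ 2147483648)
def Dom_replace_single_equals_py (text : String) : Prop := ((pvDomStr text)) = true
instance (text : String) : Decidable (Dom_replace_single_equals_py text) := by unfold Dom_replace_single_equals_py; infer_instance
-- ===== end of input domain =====

-- B replaces A's per-character index scan by a staged run-based algorithm:
-- split the text on '=' once, classify each gap from the emptiness of the
-- neighbouring parts and the last character of the left part, then rejoin
-- (objective: faster by a constant factor: the character-level work moves into str.split/join).


-- ===== PORT A =====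
-- Literal transliteration of A's while loop: out is the list of appended pieces
-- (each piece a 1- or 2-char string, kept as List Char), final "".join = flatten.
-- Python's prev/nxt are "" or a 1-char string; "" is rendered as none, "c" as some c
-- (exact: the compared strings "!", ">", "<", "=" are 1-char, and text[i-1]/text[i+1]
-- are only read under the bounds test Python performs, which getElem? makes total).
def pvALoop (cs : List Char) (i : Nat) (out : List (List Char)) : List (List Char) :=
  if h : i < cs.length then
    let ch := cs[i]
    if ch = '=' then
      let prev : Option Char := if 0 < i then cs[i-1]? else none
      let nxt : Option Char := cs[i+1]?
      if prev = some '!' ∨ prev = some '>' ∨ prev = some '<' ∨ prev = some '=' ∨ nxt = some '=' then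
        pvALoop cs (i+1) (out ++ [['=']])
      else
        pvALoop cs (i+1) (out ++ [['='], ['=']])
    else
      pvALoop cs (i+1) (out ++ [[ch]])
  else out
termination_by cs.length - i

def replace_single_equals_py (text : String) : String :=
  String.mk (pvALoop text.toList 0 []).flatten

-- ===== PORT B =====
-- Transliteration of B: parts = text.split('='), then one loop over the gaps
-- k = 1 .. len(parts)-1 appending first the separator ('==' if the gap's '=' is
-- standalone, else '='), then parts[k]; ''.join = flatten.
-- parts[0], parts[k-1], parts[k] are always in range (split returns ≥ 1 part and
-- 1 ≤ k < n), so Python's indexing is rendered by the total pyGetD.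
def pvBLoop (parts : List (List Char)) (n : Nat) (pieces : List (List Char)) (k : Int) : List (List Char) :=
  let left := PySem.List.pyGetD parts (k - 1) []
  let right := PySem.List.pyGetD parts k []
  let single := (left ≠ [] ∨ k = 1) ∧ (right ≠ [] ∨ k = (n : Int) - 1) ∧
    (left = [] ∨ (left.getLast? ≠ some '!' ∧ left.getLast? ≠ some '<' ∧ left.getLast? ≠ some '>'))
  pieces ++ [if single then ['=', '='] else ['=']] ++ [right]

def replace_single_equals_py_alt (text : String) : String :=
  let parts := PySem.Chars.splitOn text.toList ['=']
  let n := parts.length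
  let pieces := (PySem.List.pyRange 1 (n : Int) 1).foldl (pvBLoop parts n) [PySem.List.pyGetD parts 0 []]
  String.mk pieces.flatten

-- ===== PRECONDITION & SPEC =====
def Spec_replace_single_equals_py (text : String) (out : String) : Prop := out = replace_single_equals_py_alt text
instance (text : String) (out : String) : Decidable (Spec_replace_single_equals_py text out) := by unfold Spec_replace_single_equals_py; infer_instance

-- ===== CLAIM (what is proved, stated in full; the proofs are below) =====
def Claim_equal_replace_single_equals_py : Prop := ∀ (text : String), Dom_replace_single_equals_py text → Spec_replace_single_equals_py text (replace_single_equals_py text)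

-- ===== LEMMAS AND PROOFS =====

-- structural characterisation of split-on-'='
def pvSfun : List Char → List (List Char)
  | [] => [[]]
  | c :: t =>
    if c = '=' then [] :: pvSfun t
    else
      match pvSfun t with
      | [] => [[c]]
      | p :: ps => (c :: p) :: ps

def pvConsHead (pre : List Char) : List (List Char) → List (List Char)
  | [] => [pre]
  | p :: ps => (pre ++ p) :: ps

lemma pvSfun_ne_nil (t : List Char) : pvSfun t ≠ [] := by
  cases t with
  | nil => simp [pvSfun]
  | cons c t =>
    by_cases h : c = '='
    · simp [pvSfun, h]
    · cases hs : pvSfun t with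
      | nil => simp [pvSfun, h, hs]
      | cons p ps => simp [pvSfun, h, hs]

lemma pvGo_eq (fuel : Nat) : ∀ (l cur : List Char) (accs : List (List Char)),
    l.length < fuel →
    PySem.Chars.splitOn.go ['='] fuel l cur accs = accs.reverse ++ pvConsHead cur.reverse (pvSfun l) := by
  induction fuel with
  | zero => intro l cur accs h; simp at h
  | succ fuel ih =>
    intro l cur accs h
    cases l with
    | nil =>
      rw [PySem.Chars.splitOn.go]
      · simp [pvSfun, pvConsHead]
      · omega
    | cons c rest =>
      rw [PySem.Chars.splitOn.go]
      by_cases hc : c = '='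
      · have hpre : ['='].isPrefixOf (c :: rest) = true := by simp [hc, List.isPrefixOf]
        rw [if_pos hpre, List.length_singleton, List.drop_one, List.tail_cons,
          ih rest [] (cur.reverse :: accs) (by simp at h ⊢; omega)]
        cases hs : pvSfun rest with
        | nil => exact absurd hs (pvSfun_ne_nil rest)
        | cons p ps => simp [pvSfun, hc, hs, pvConsHead]
      · have hpre : ['='].isPrefixOf (c :: rest) = false := by
          simp [List.isPrefixOf]
          exact fun hh => absurd hh.symm hc
        rw [if_neg (by simp [hpre]), ih rest (c :: cur) accs (by simp at h ⊢; omega)]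
        cases hs : pvSfun rest with
        | nil => exact absurd hs (pvSfun_ne_nil rest)
        | cons p ps => simp [pvSfun, hc, hs, pvConsHead]

lemma pvSplitOn_eq (cs : List Char) :
    PySem.Chars.splitOn cs ['='] = pvSfun cs := by
  unfold PySem.Chars.splitOn
  rw [pvGo_eq (cs.length + 1) cs [] [] (by omega)]
  cases hs : pvSfun cs with
  | nil => exact absurd hs (pvSfun_ne_nil cs)
  | cons p ps => simp [pvConsHead]

-- canonical one-pass recursion carrying the previous character; A reduces to it
def pvGo (p : Option Char) : List Char → List (List Char)
  | [] => []
  | c :: rest =>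
    (if c = '=' ∧ p ≠ some '!' ∧ p ≠ some '>' ∧ p ≠ some '<' ∧ p ≠ some '=' ∧ rest.head? ≠ some '='
     then ['=', '='] else [c]) :: pvGo (some c) rest

lemma pvALoop_eq_go (cs : List Char) : ∀ (k i : Nat) (out : List (List Char)),
    cs.length - i ≤ k →
    (pvALoop cs i out).flatten
      = out.flatten ++ (pvGo (if 0 < i then cs[i-1]? else none) (cs.drop i)).flatten := by
  intro k
  induction k with
  | zero =>
    intro i out hk
    have hge : cs.length ≤ i := by omega
    rw [pvALoop, List.drop_eq_nil_of_le hge]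
    simp [pvGo, Nat.not_lt.mpr hge]
  | succ k ih =>
    intro i out hk
    by_cases h : i < cs.length
    · have hdrop : cs.drop i = cs[i] :: cs.drop (i+1) := List.drop_eq_getElem_cons h
      have hhead : (cs.drop (i+1)).head? = cs[i+1]? := by rw [List.head?_drop]
      have hprev' : (if 0 < i + 1 then cs[(i+1)-1]? else none) = some cs[i] := by
        simp [List.getElem?_eq_getElem h]
      rw [pvALoop]
      simp only [h, dif_pos]
      rw [hdrop]
      by_cases hc : cs[i] = '='
      · simp only [hc, pvGo, hhead, if_true, true_and]
        by_cases hcond : (if 0 < i then cs[i-1]? else none) = some '!' ∨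
            (if 0 < i then cs[i-1]? else none) = some '>' ∨
            (if 0 < i then cs[i-1]? else none) = some '<' ∨
            (if 0 < i then cs[i-1]? else none) = some '=' ∨ cs[i+1]? = some '='
        · rw [if_pos hcond, if_neg (by tauto), ih (i+1) _ (by omega), hprev', hc]
          simp
        · push_neg at hcond
          rw [if_neg (by tauto), if_pos ⟨hcond.1, hcond.2.1, hcond.2.2.1, hcond.2.2.2.1, hcond.2.2.2.2⟩,
            ih (i+1) _ (by omega), hprev', hc]
          simp
      · rw [if_neg hc, ih (i+1) _ (by omega), hprev']
        simp only [pvGo, hhead]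
        rw [if_neg (fun hh => hc hh.1)]
        simp
    · have hge : cs.length ≤ i := by omega
      rw [pvALoop]
      simp [Nat.not_lt.mpr hge, List.drop_eq_nil_of_le hge, pvGo]

-- run-level recursion: the flattened result as a function of the split parts
def pvG (atStart : Bool) : List (List Char) → List Char
  | [] => []
  | [p] => p
  | left :: right :: rest =>
    left ++
      (if (left ≠ [] ∨ atStart = true) ∧ (right ≠ [] ∨ rest = []) ∧
          (left = [] ∨ (left.getLast? ≠ some '!' ∧ left.getLast? ≠ some '<' ∧ left.getLast? ≠ some '>'))
       then ['=', '='] else ['=']) ++ pvG false (right :: rest)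

lemma pvGo_eq_G (cs : List Char) : ∀ (p : Option Char),
    (pvGo p cs).flatten
      = pvG (decide (p ≠ some '!' ∧ p ≠ some '>' ∧ p ≠ some '<' ∧ p ≠ some '=')) (pvSfun cs) := by
  induction cs with
  | nil => intro p; simp [pvGo, pvSfun, pvG]
  | cons c t ih =>
    intro p
    by_cases hc : c = '='
    · subst hc
      have hrec : (pvGo (some '=') t).flatten = pvG false (pvSfun t) := by
        have h := ih (some '=')
        simpa using h
      have hshape : ∃ right rest, pvSfun t = right :: rest ∧
          ((t.head? ≠ some '=') ↔ (right ≠ [] ∨ rest = [])) := by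
        cases t with
        | nil => exact ⟨[], [], by simp [pvSfun], by simp⟩
        | cons c' t' =>
          by_cases hc' : c' = '='
          · exact ⟨[], pvSfun t', by simp [pvSfun, hc'], by simp [hc', pvSfun_ne_nil t']⟩
          · cases hs' : pvSfun t' with
            | nil => exact absurd hs' (pvSfun_ne_nil t')
            | cons p' ps' =>
              exact ⟨c' :: p', ps', by simp [pvSfun, hc', hs'], by simp [hc']⟩
      obtain ⟨right, rest, hs, hok⟩ := hshape
      rw [show pvSfun ('=' :: t) = [] :: pvSfun t from by simp [pvSfun], hs]
      simp only [pvGo, List.flatten_cons]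
      rw [hrec, hs]
      simp only [pvG, List.nil_append]
      congr 1
      apply if_congr _ rfl rfl
      simp only [decide_eq_true_eq, ne_eq, true_and, not_true_eq_false,
        false_or]
      tauto
    · have hsf : ∃ h tl, pvSfun t = h :: tl ∧ pvSfun (c :: t) = (c :: h) :: tl := by
        cases hs' : pvSfun t with
        | nil => exact absurd hs' (pvSfun_ne_nil t)
        | cons h tl => exact ⟨h, tl, rfl, by simp [pvSfun, hc, hs']⟩
      obtain ⟨h, tl, hst, hsc⟩ := hsf
      have hrec : (pvGo (some c) t).flatten
          = pvG (decide (c ≠ '!' ∧ c ≠ '>' ∧ c ≠ '<' ∧ c ≠ '=')) (pvSfun t) := by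
        have hh := ih (some c)
        simpa using hh
      rw [hsc]
      simp only [pvGo, List.flatten_cons]
      rw [if_neg (fun hh => hc hh.1), hrec, hst]
      cases tl with
      | nil => simp [pvG]
      | cons r rs =>
        simp only [pvG, List.cons_append, List.append_assoc]
        congr 1
        refine congrArg (h ++ ·) ?_
        refine congrArg (· ++ pvG false (r :: rs)) ?_
        apply if_congr _ rfl rfl
        cases h with
        | nil =>
          simp only [decide_eq_true_eq, ne_eq, List.getLast?_singleton,
            true_or, not_true_eq_false, false_or, Option.some.injEq,
            List.cons_ne_nil, not_false_eq_true, true_and, and_true]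
          tauto
        | cons x xs =>
          simp only [List.getLast?_cons_cons, List.cons_ne_nil, not_false_eq_true, true_or,
            true_and, ne_eq, false_or]

-- the B-side loop, re-indexed: tail of pieces from gap j onward
def pvTail (parts : List (List Char)) (j : Nat) : List (List Char) :=
  if h : j < parts.length then
    (if (parts.getD (j-1) [] ≠ [] ∨ j = 1) ∧ (parts.getD j [] ≠ [] ∨ j = parts.length - 1) ∧
        (parts.getD (j-1) [] = [] ∨ ((parts.getD (j-1) []).getLast? ≠ some '!' ∧
          (parts.getD (j-1) []).getLast? ≠ some '<' ∧ (parts.getD (j-1) []).getLast? ≠ some '>'))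
     then ['=', '='] else ['=']) :: parts.getD j [] :: pvTail parts (j+1)
  else []
termination_by parts.length - j

lemma pvFold_eq_tail (parts : List (List Char)) : ∀ (fuel j : Nat) (pieces : List (List Char)),
    parts.length - j ≤ fuel → 1 ≤ j →
    (PySem.List.pyRange (j : Int) (parts.length : Int) 1).foldl (pvBLoop parts parts.length) pieces
      = pieces ++ pvTail parts j := by
  intro fuel
  induction fuel with
  | zero =>
    intro j pieces hf hj
    have hle : parts.length ≤ j := by omega
    have hr : PySem.List.pyRange (j : Int) (parts.length : Int) 1 = [] := by
      simp [PySem.List.pyRange]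
      omega
    rw [hr, pvTail, dif_neg (by omega)]
    simp
  | succ fuel ih =>
    intro j pieces hf hj
    by_cases hlt : j < parts.length
    · have hcast : ((j : Int)) < (parts.length : Int) := by exact_mod_cast hlt
      rw [PySem.List.pyRange_one_cons hcast, List.foldl_cons,
        show ((j : Int)) + 1 = (((j+1 : Nat)) : Int) by push_cast; ring,
        ih (j+1) _ (by omega) (by omega)]
      conv_rhs => rw [pvTail, dif_pos hlt]
      have hg1 : PySem.List.pyGetD parts ((j : Int) - 1) [] = parts.getD (j-1) [] := by
        rw [show ((j : Int)) - 1 = (((j - 1 : Nat)) : Int) by omega, PySem.List.pyGetD_natCast]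
      have hg2 : PySem.List.pyGetD parts ((j : Int)) [] = parts.getD j [] := by
        rw [PySem.List.pyGetD_natCast]
      have hiff1 : ((j : Int)) = 1 ↔ j = 1 := by omega
      have hiff2 : ((j : Int)) = (parts.length : Int) - 1 ↔ j = parts.length - 1 := by omega
      unfold pvBLoop
      simp only [hg1, hg2]
      simp only [List.append_assoc, List.cons_append, List.nil_append]
      refine congrArg (pieces ++ ·) ?_
      refine congrArg (fun z => z :: parts.getD j [] :: pvTail parts (j+1)) ?_
      apply if_congr _ rfl rfl
      rw [hiff1, hiff2]
    · have hr : PySem.List.pyRange (j : Int) (parts.length : Int) 1 = [] := by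
        simp [PySem.List.pyRange]
        omega
      rw [hr, pvTail, dif_neg hlt]
      simp

lemma pvTail_flatten (parts : List (List Char)) : ∀ (fuel j : Nat),
    parts.length - j ≤ fuel → 1 ≤ j → j ≤ parts.length →
    (parts.getD (j-1) [] :: pvTail parts j).flatten
      = pvG (decide (j = 1)) (parts.drop (j-1)) := by
  intro fuel
  induction fuel with
  | zero =>
    intro j hf h1 h2
    have hj : j = parts.length := by omega
    have hlt : j - 1 < parts.length := by omega
    rw [pvTail, dif_neg (by omega), List.drop_eq_getElem_cons hlt,
      show parts.drop (j-1+1) = [] from by rw [List.drop_eq_nil_iff]; omega,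
      List.getD_eq_getElem parts [] hlt]
    simp [pvG]
  | succ fuel ih =>
    intro j hf h1 h2
    by_cases hlt : j < parts.length
    · have hj1 : j - 1 < parts.length := by omega
      have hdrop1 : parts.drop (j-1) = parts[j-1] :: parts.drop j := by
        rw [List.drop_eq_getElem_cons hj1, show j - 1 + 1 = j from by omega]
      have hdrop2 : parts.drop j = parts[j] :: parts.drop (j+1) := List.drop_eq_getElem_cons hlt
      have hih := ih (j+1) (by omega) (by omega) (by omega)
      rw [show j + 1 - 1 = j from rfl] at hih
      have hne : j + 1 ≠ 1 := by omega
      have hihs : parts.getD j [] ++ (pvTail parts (j+1)).flatten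
          = pvG false (parts[j] :: parts.drop (j+1)) := by
        simp only [List.flatten_cons, hne, decide_false] at hih
        rw [← hdrop2, hih]
      rw [pvTail, dif_pos hlt, hdrop1, hdrop2]
      simp only [List.flatten_cons, pvG, List.append_assoc]
      rw [hihs]
      rw [List.getD_eq_getElem parts [] hj1, List.getD_eq_getElem parts [] hlt]
      refine congrArg (parts[j-1] ++ ·) ?_
      refine congrArg (· ++ pvG false (parts[j] :: parts.drop (j+1))) ?_
      apply if_congr _ rfl rfl
      simp only [decide_eq_true_eq]
      refine and_congr Iff.rfl (and_congr (or_congr Iff.rfl ?_) Iff.rfl)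
      rw [List.drop_eq_nil_iff]
      omega
    · have hj : j = parts.length := by omega
      have hlt2 : j - 1 < parts.length := by omega
      rw [pvTail, dif_neg (by omega), List.drop_eq_getElem_cons hlt2,
        show parts.drop (j-1+1) = [] from by rw [List.drop_eq_nil_iff]; omega,
        List.getD_eq_getElem parts [] hlt2]
      simp [pvG]

-- ===== VERDICT (by name: the statement is the Claim_ definition above) =====
theorem replace_single_equals_py_spec : Claim_equal_replace_single_equals_py := by
  intro text _
  unfold Spec_replace_single_equals_py replace_single_equals_py replace_single_equals_py_alt
  rw [pvALoop_eq_go text.toList text.toList.length 0 [] (by omega)]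
  simp only [List.flatten_nil, List.nil_append, List.drop_zero, if_neg (lt_irrefl 0)]
  rw [pvGo_eq_G, pvSplitOn_eq]
  have hlen : 1 ≤ (pvSfun text.toList).length := by
    cases hs : pvSfun text.toList with
    | nil => exact absurd hs (pvSfun_ne_nil _)
    | cons p ps => simp
  have hfold := pvFold_eq_tail (pvSfun text.toList) (pvSfun text.toList).length 1
    [PySem.List.pyGetD (pvSfun text.toList) 0 []] (by omega) (by omega)
  norm_num at hfold
  rw [hfold]
  have hget : PySem.List.pyGetD (pvSfun text.toList) 0 [] = (pvSfun text.toList).getD 0 [] := by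
    rw [show (0:Int) = ((0:Nat):Int) from rfl, PySem.List.pyGetD_natCast]
  rw [hget]
  have ht := pvTail_flatten (pvSfun text.toList) (pvSfun text.toList).length 1 (by omega) le_rfl hlen
  simp only [show (1:Nat) - 1 = 0 from rfl, List.drop_zero] at ht
  rw [ht]
  rfl
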